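-- pv_equiv track=rewrite | github.com/f4r6d/Password-Hacker-jetBrains | hack.py | pass_reader
-- ===== SOURCE A (Python) =====
-- import itertools
--
-- def pass_reader(pass_file):
--     for line in pass_file:
--         if line:
--             password = line.strip()
--             pass_letters = []
--             for i in password:
--                 if i in '0123456789':
--                     pass_letters.append(i)
--                     continue
--                 else:
--                     pass_letters.append((i, i.upper()))
--             pass_upper_lower = itertools.product(*pass_letters)
--             for i in pass_upper_lower:
--                 yield ''.join(i)
-- ===== SOURCE B (Python) =====
-- def pass_reader(pass_file):
--     for line in pass_file:
--         if line:
--             password = line.strip()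
--             k = sum(1 for c in password if c not in '0123456789')
--             for n in range(2 ** k):
--                 out = []
--                 r = k
--                 for c in password:
--                     if c in '0123456789':
--                         out.append(c)
--                     else:
--                         r -= 1
--                         out.append(c.upper() if (n >> r) & 1 else c)
--                 yield ''.join(out)
-- ===== Notes on version B (the rewrite author's own statement) =====
-- stated objective: alternative
-- what changed: Replaces itertools.product over per-character (c, c.upper()) tuples (which materialises choice tuples) by a single integer counter n in range(2**k) whose bits, MSB-first, decide upper/lower for each of the k non-digit characters while digits pass through.
import Mathlib
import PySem

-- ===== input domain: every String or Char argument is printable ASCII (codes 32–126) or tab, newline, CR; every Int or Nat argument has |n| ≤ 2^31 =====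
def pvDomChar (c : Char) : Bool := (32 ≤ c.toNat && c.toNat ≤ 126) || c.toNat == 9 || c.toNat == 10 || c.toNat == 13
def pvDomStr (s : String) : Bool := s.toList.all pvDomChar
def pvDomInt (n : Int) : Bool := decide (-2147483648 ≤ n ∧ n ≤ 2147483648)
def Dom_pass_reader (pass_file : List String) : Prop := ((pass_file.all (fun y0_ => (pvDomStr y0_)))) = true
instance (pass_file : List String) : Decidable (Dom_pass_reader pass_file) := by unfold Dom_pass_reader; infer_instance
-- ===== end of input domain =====

-- B replaces A's itertools.product over per-character (char, char.upper()) pairs by a single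
-- bitmask counter n over range(2**k) (k = number of non-digit characters, leftmost letter =
-- most significant bit); objective: alternative (same exponential output size, no product lists built).
-- Both programs only read their argument; the generators are ported as the list of yielded strings.

-- ===== PORT A =====
-- 'i in "0123456789"' on a single character i is exactly membership of that character
def paIsDigitChar (c : Char) : Bool := "0123456789".toList.contains c

-- pass_letters: the loop appending, per character, the 1- or 2-way choice (each piece one char)
def paOpts (password : List Char) : List (List Char) :=
  password.map (fun c => if paIsDigitChar c then [c] else [c, PySem.Chars.upperChar c])

-- itertools.product(*pass_letters): first factor varies slowest
def paProd : List (List Char) → List (List Char)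
  | [] => [[]]
  | xs :: rest => xs.flatMap (fun x => (paProd rest).map (fun t => x :: t))

-- ''.join over a tuple of single-char strings is String.mk of those chars
def pass_reader (pass_file : List String) : List String :=
  pass_file.flatMap (fun line =>
    if line ≠ "" then
      (paProd (paOpts (PySem.Str.strip line).toList)).map (fun t => String.mk t)
    else [])

-- ===== PORT B =====
-- the inner 'for c in password' loop of Source B: r counts bits still unused, from k down
def pbBuild : List Char → Nat → Nat → List Char
  | [], _, _ => []
  | c :: cs, r, n =>
    if "0123456789".toList.contains c then c :: pbBuild cs r n
    else
      (if (n >>> (r - 1)) &&& 1 == 1 then PySem.Chars.upperChar c else c) :: pbBuild cs (r - 1) n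

def pass_reader_alt (pass_file : List String) : List String :=
  pass_file.flatMap (fun line =>
    if line ≠ "" then
      let password := (PySem.Str.strip line).toList
      let k := password.countP (fun c => !("0123456789".toList.contains c))
      (List.range (2 ^ k)).map (fun n => String.mk (pbBuild password k n))
    else [])

-- ===== PRECONDITION & SPEC =====
def Spec_pass_reader (pass_file : List String) (out : List String) : Prop := out = pass_reader_alt pass_file
instance (pass_file : List String) (out : List String) : Decidable (Spec_pass_reader pass_file out) := by unfold Spec_pass_reader; infer_instance

-- ===== CLAIM (what is proved, stated in full; the proofs are below) =====
def Claim_equal_pass_reader : Prop := ∀ (pass_file : List String), Dom_pass_reader pass_file → Spec_pass_reader pass_file (pass_reader pass_file)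

-- ===== LEMMAS AND PROOFS =====

-- the number of letter (non-digit) positions
def pbK (cs : List Char) : Nat := cs.countP (fun c => !("0123456789".toList.contains c))

theorem opts_cons (c : Char) (cs : List Char) : paOpts (c :: cs) =
    (if "0123456789".toList.contains c then [c] else [c, PySem.Chars.upperChar c]) :: paOpts cs := rfl

theorem prod_one (a : Char) (rest : List (List Char)) :
    paProd ([a] :: rest) = (paProd rest).map (a :: ·) := by
  simp [paProd]

theorem prod_two (a b : Char) (rest : List (List Char)) :
    paProd ([a, b] :: rest) = (paProd rest).map (a :: ·) ++ (paProd rest).map (b :: ·) := by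
  simp [paProd]

theorem build_digit (c : Char) (cs : List Char) (r n : Nat)
    (hd : "0123456789".toList.contains c = true) :
    pbBuild (c :: cs) r n = c :: pbBuild cs r n := by
  simp only [pbBuild]; rw [if_pos hd]

theorem build_letter (c : Char) (cs : List Char) (r n : Nat)
    (hd : "0123456789".toList.contains c = false) :
    pbBuild (c :: cs) r n =
      (if (n >>> (r - 1)) &&& 1 == 1 then PySem.Chars.upperChar c else c) :: pbBuild cs (r - 1) n := by
  simp only [pbBuild]; rw [if_neg (by simp only [hd]; exact Bool.false_ne_true)]

theorem pbK_cons_digit (c : Char) (cs : List Char)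
    (hd : "0123456789".toList.contains c = true) : pbK (c :: cs) = pbK cs := by
  unfold pbK; rw [List.countP_cons]; simp only [hd, Bool.not_true]; rfl

theorem pbK_cons_letter (c : Char) (cs : List Char)
    (hd : "0123456789".toList.contains c = false) : pbK (c :: cs) = pbK cs + 1 := by
  unfold pbK; rw [List.countP_cons]; simp only [hd, Bool.not_false]; rfl

theorem pbBuild_bit (n r : Nat) : ((n >>> r) &&& 1 == 1) = n.testBit r := by
  simp only [Nat.and_one_is_mod, Nat.testBit, Nat.one_and_eq_mod_two]
  rcases Nat.mod_two_eq_zero_or_one (n >>> r) with h | h <;> simp [h]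

-- pbBuild only looks at bits below r (when r bounds the letter count)
theorem pbBuild_stable (cs : List Char) : ∀ (r n m : Nat),
    pbK cs ≤ r → n % 2 ^ r = m % 2 ^ r → pbBuild cs r n = pbBuild cs r m := by
  induction cs with
  | nil => intro r n m _ _; rfl
  | cons c cs ih =>
    intro r n m hk hmod
    cases hd : "0123456789".toList.contains c
    · rw [pbK_cons_letter c cs hd] at hk
      have hr : 1 ≤ r := by omega
      have hbit : n.testBit (r - 1) = m.testBit (r - 1) := by
        have h1 : (n % 2 ^ r).testBit (r - 1) = (m % 2 ^ r).testBit (r - 1) := by rw [hmod]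
        simpa [Nat.testBit_mod_two_pow, Nat.sub_lt_of_pos_le Nat.one_pos hr] using h1
      have hmod' : n % 2 ^ (r - 1) = m % 2 ^ (r - 1) := by
        have hdvd : 2 ^ (r - 1) ∣ 2 ^ r := pow_dvd_pow 2 (by omega)
        calc n % 2 ^ (r - 1) = n % 2 ^ r % 2 ^ (r - 1) := (Nat.mod_mod_of_dvd n hdvd).symm
          _ = m % 2 ^ r % 2 ^ (r - 1) := by rw [hmod]
          _ = m % 2 ^ (r - 1) := Nat.mod_mod_of_dvd m hdvd
      rw [build_letter c cs r n hd, build_letter c cs r m hd,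
        pbBuild_bit, pbBuild_bit, hbit, ih (r - 1) n m (by omega) hmod']
    · rw [pbK_cons_digit c cs hd] at hk
      rw [build_digit c cs r n hd, build_digit c cs r m hd, ih r n m hk hmod]

-- the heart: bitmask enumeration in MSB-first order equals itertools.product
theorem main_lemma (cs : List Char) :
    paProd (paOpts cs) = (List.range (2 ^ pbK cs)).map (fun n => pbBuild cs (pbK cs) n) := by
  induction cs with
  | nil => rfl
  | cons c cs ih =>
    cases hd : "0123456789".toList.contains c
    · rw [pbK_cons_letter c cs hd, opts_cons, if_neg (by simp only [hd]; exact Bool.false_ne_true), prod_two, ih]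
      have hsplit : List.range (2 ^ (pbK cs + 1)) =
          List.range (2 ^ pbK cs) ++ (List.range (2 ^ pbK cs)).map (2 ^ pbK cs + ·) := by
        rw [pow_succ, Nat.mul_two, List.range_add]
      rw [hsplit, List.map_append, List.map_map, List.map_map]
      congr 1
      · apply List.map_congr_left
        intro m hm
        have hm' := List.mem_range.mp hm
        have hz : ((m >>> pbK cs) &&& 1 == 1) = false := by
          rw [pbBuild_bit]
          simp [Nat.testBit, Nat.shiftRight_eq_div_pow, Nat.div_eq_of_lt hm']
        simp only [Function.comp, build_letter c cs (pbK cs + 1) m hd,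
          Nat.add_sub_cancel, hz, if_neg, Bool.false_eq_true, not_false_iff]
      · rw [List.map_map]
        apply List.map_congr_left
        intro m hm
        have hm' := List.mem_range.mp hm
        have hdiv : (2 ^ pbK cs + m) / 2 ^ pbK cs = 1 := by
          rw [Nat.add_div_left m (Nat.two_pow_pos (pbK cs)), Nat.div_eq_of_lt hm']
        have ho : (((2 ^ pbK cs + m) >>> pbK cs) &&& 1 == 1) = true := by
          simp [Nat.shiftRight_eq_div_pow, hdiv]
        have hrec : pbBuild cs (pbK cs) (2 ^ pbK cs + m) = pbBuild cs (pbK cs) m :=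
          pbBuild_stable cs (pbK cs) (2 ^ pbK cs + m) m (le_refl _)
            (by rw [Nat.add_mod_left, Nat.mod_eq_of_lt hm'])
        simp only [Function.comp, build_letter c cs (pbK cs + 1) (2 ^ pbK cs + m) hd,
          Nat.add_sub_cancel, ho, if_pos, hrec]
    · rw [pbK_cons_digit c cs hd, opts_cons, if_pos hd, prod_one, ih, List.map_map]
      apply List.map_congr_left
      intro m _
      exact (build_digit c cs (pbK cs) m hd).symm

-- ===== VERDICT (by name: the statement is the Claim_ definition above) =====
theorem pass_reader_spec : Claim_equal_pass_reader := by
  intro pass_file _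
  unfold Spec_pass_reader pass_reader pass_reader_alt
  have hfun : ∀ line : String,
      (if line ≠ "" then
        (paProd (paOpts (PySem.Str.strip line).toList)).map (fun t => String.mk t)
      else []) =
      (if line ≠ "" then
        (List.range (2 ^ (PySem.Str.strip line).toList.countP
            (fun c => !("0123456789".toList.contains c)))).map
          (fun n => String.mk (pbBuild (PySem.Str.strip line).toList
            ((PySem.Str.strip line).toList.countP (fun c => !("0123456789".toList.contains c))) n))
      else []) := by
    intro line
    by_cases h : line ≠ ""
    · rw [if_pos h, if_pos h, main_lemma, List.map_map]
      rfl
    · rw [if_neg h, if_neg h]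
  simp only [hfun]
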